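-- pv_equiv track=rewrite | github.com/AngelPereiraR/IABD_PIA | Tema 01/Actividades Aprendizaje/Listas/act-26.py | buscarPosicionPalabra
-- ===== SOURCE A (Python) =====
-- def buscarPosicionPalabra(lista, palabra, fila=0, columna=0):
--     if fila >= len(lista):
--         return (-1, -1)
--     if columna >= len(lista[fila]):
--         return buscarPosicionPalabra(lista, palabra, fila + 1, 0)
--     if lista[fila][columna] == palabra:
--         return (fila, columna)
--     return buscarPosicionPalabra(lista, palabra, fila, columna + 1)
-- ===== SOURCE B (Python) =====
-- def buscarPosicionPalabra(lista, palabra, fila=0, columna=0):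
--     for i in range(fila, len(lista)):
--         start = columna if i == fila else 0
--         for j in range(start, len(lista[i])):
--             if lista[i][j] == palabra:
--                 return (i, j)
--     return (-1, -1)
-- ===== Notes on version B (the rewrite author's own statement) =====
-- stated objective: simpler
-- what changed: Replaces the per-cell recursion (one call per cell, threading fila/columna through recursive calls) by plain nested for-loops over ranges with an early return, honoring the start offsets (first row from columna, later rows from 0).
import Mathlib
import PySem

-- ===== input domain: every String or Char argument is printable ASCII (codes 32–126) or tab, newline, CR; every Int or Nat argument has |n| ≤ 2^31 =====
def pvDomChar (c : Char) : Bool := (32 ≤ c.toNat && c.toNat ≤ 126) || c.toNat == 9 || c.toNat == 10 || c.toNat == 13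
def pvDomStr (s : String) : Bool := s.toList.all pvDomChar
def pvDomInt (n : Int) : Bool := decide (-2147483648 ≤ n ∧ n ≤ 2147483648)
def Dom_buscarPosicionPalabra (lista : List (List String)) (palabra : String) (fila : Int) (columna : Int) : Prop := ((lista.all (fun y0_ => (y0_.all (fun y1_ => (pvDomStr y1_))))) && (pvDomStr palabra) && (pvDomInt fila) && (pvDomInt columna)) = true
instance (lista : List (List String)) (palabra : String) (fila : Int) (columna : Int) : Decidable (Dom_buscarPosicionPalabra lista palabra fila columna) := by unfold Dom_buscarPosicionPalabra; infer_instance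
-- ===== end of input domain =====

-- B replaces A's per-cell recursion by nested for-loops with an early return (objective: simpler).

-- used by the port's termination proof (and the equivalence proof below)
theorem pyGetD_of_some {α : Type} (xs : List α) (i : Int) (d x : α)
    (h : PySem.List.pyGet? xs i = some x) : PySem.List.pyGetD xs i d = x := by
  simp [PySem.List.pyGet?, PySem.List.pyGetD] at *
  simp [h]

-- ===== PORT A =====
-- where Python A raises IndexError (negative index out of range), the port returns (-1,-1);
-- those inputs are excluded by Pre_buscarPosicionPalabra.
def buscarPosicionPalabra (lista : List (List String)) (palabra : String) (fila : Int) (columna : Int) : Int × Int :=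
  if (lista.length : Int) ≤ fila then (-1, -1)
  else
    match h : PySem.List.pyGet? lista fila with
    | none => (-1, -1)  -- Python: IndexError
    | some row =>
      if (row.length : Int) ≤ columna then
        buscarPosicionPalabra lista palabra (fila + 1) 0
      else
        match PySem.List.pyGet? row columna with
        | none => (-1, -1)  -- Python: IndexError
        | some w =>
          if w = palabra then (fila, columna)
          else buscarPosicionPalabra lista palabra fila (columna + 1)
termination_by (((lista.length : Int) - fila).toNat, (((PySem.List.pyGetD lista fila []).length : Int) - columna).toNat)
decreasing_by
  · apply Prod.Lex.left; omega
  · have := pyGetD_of_some lista fila [] row h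
    apply Prod.Lex.right'
    · omega
    · rw [this]; omega

-- ===== PORT B =====
-- inner loop: for j in js: if lista[i][j] == palabra: return (i, j)
def pvScanRow (row : List String) (palabra : String) (i : Int) : List Int → Option (Int × Int)
  | [] => none
  | j :: js =>
    if PySem.List.pyGetD row j "" = palabra then some (i, j)
    else pvScanRow row palabra i js

-- outer loop: for i in is: start = columna if i == fila else 0; scan the row; else continue
def pvScanRows (lista : List (List String)) (palabra : String) (fila : Int) (columna : Int) : List Int → Option (Int × Int)
  | [] => none
  | i :: is =>
    let row := PySem.List.pyGetD lista i []
    let start := if i = fila then columna else 0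
    match pvScanRow row palabra i (PySem.List.pyRange start (row.length : Int) 1) with
    | some p => some p
    | none => pvScanRows lista palabra fila columna is

def buscarPosicionPalabra_alt (lista : List (List String)) (palabra : String) (fila : Int) (columna : Int) : Int × Int :=
  (pvScanRows lista palabra fila columna (PySem.List.pyRange fila (lista.length : Int) 1)).getD (-1, -1)

-- ===== PRECONDITION & SPEC =====
-- Pre_ excludes exactly the inputs on which Python A raises IndexError (a negative fila or
-- columna whose wraparound index is out of range); Python B raises there too.
def Pre_buscarPosicionPalabra (lista : List (List String)) (palabra : String) (fila : Int) (columna : Int) : Prop :=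
  (lista.length : Int) ≤ fila ∨
  (-(lista.length : Int) ≤ fila ∧
    (((PySem.List.pyGetD lista fila []).length : Int) ≤ columna ∨
     -((PySem.List.pyGetD lista fila []).length : Int) ≤ columna))
instance (lista : List (List String)) (palabra : String) (fila : Int) (columna : Int) : Decidable (Pre_buscarPosicionPalabra lista palabra fila columna) := by unfold Pre_buscarPosicionPalabra; infer_instance

def pvWitness_buscarPosicionPalabra : List (List String) × String × Int × Int := ([["a"], ["b"]], "b", 0, 0)

def Spec_buscarPosicionPalabra (lista : List (List String)) (palabra : String) (fila : Int) (columna : Int) (out : Int × Int) : Prop := out = buscarPosicionPalabra_alt lista palabra fila columna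
instance (lista : List (List String)) (palabra : String) (fila : Int) (columna : Int) (out : Int × Int) : Decidable (Spec_buscarPosicionPalabra lista palabra fila columna out) := by unfold Spec_buscarPosicionPalabra; infer_instance

-- ===== CLAIM (what is proved, stated in full; the proofs are below) =====
def Claim_equal_buscarPosicionPalabra : Prop := ∀ (lista : List (List String)) (palabra : String) (fila : Int) (columna : Int), Dom_buscarPosicionPalabra lista palabra fila columna → Pre_buscarPosicionPalabra lista palabra fila columna → Spec_buscarPosicionPalabra lista palabra fila columna (buscarPosicionPalabra lista palabra fila columna)

-- ===== LEMMAS AND PROOFS =====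

-- the stored (fila, columna) pair only matters through the start offset of each visited row
theorem pvScanRows_congr (lista : List (List String)) (palabra : String)
    (f c f' c' : Int) (is : List Int)
    (h : ∀ i ∈ is, (if i = f then c else 0) = (if i = f' then c' else 0)) :
    pvScanRows lista palabra f c is = pvScanRows lista palabra f' c' is := by
  induction is with
  | nil => rfl
  | cons i is ih =>
    simp only [pvScanRows]
    rw [h i (by simp)]
    cases pvScanRow (PySem.List.pyGetD lista i []) palabra i
        (PySem.List.pyRange (if i = f' then c' else 0) ((PySem.List.pyGetD lista i []).length : Int) 1) with
    | some p => rfl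
    | none => exact ih (fun j hj => h j (by simp [hj]))

theorem pvMain (lista : List (List String)) (palabra : String) :
    ∀ (fila columna : Int), Pre_buscarPosicionPalabra lista palabra fila columna →
      buscarPosicionPalabra lista palabra fila columna = buscarPosicionPalabra_alt lista palabra fila columna := by
  intro fila columna hpre
  induction fila, columna using buscarPosicionPalabra.induct lista palabra with
  | case1 fila columna hle =>
    rw [buscarPosicionPalabra, if_pos hle, buscarPosicionPalabra_alt,
        PySem.List.pyRange_one_eq_nil hle]
    rfl
  | case2 fila columna hle hnone =>
    exfalso
    rcases hpre with h | ⟨hlo, _⟩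
    · omega
    · rw [PySem.List.pyGet?_eq_none_iff] at hnone
      exact hnone ⟨hlo, by omega⟩
  | case3 fila columna hle row hrow hcol ih =>
    have hrowD := pyGetD_of_some lista fila [] row hrow
    have hflt : fila < (lista.length : Int) := by omega
    have hlo : -(lista.length : Int) ≤ fila := by
      by_contra hc
      have : PySem.List.pyGet? lista fila = none := by
        rw [PySem.List.pyGet?_eq_none_iff]; intro ⟨h1, _⟩; omega
      simp [this] at hrow
    have hpre' : Pre_buscarPosicionPalabra lista palabra (fila + 1) 0 := by
      unfold Pre_buscarPosicionPalabra
      right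
      exact ⟨by omega, Or.inr (by omega)⟩
    rw [buscarPosicionPalabra, if_neg hle, hrow]
    simp only [if_pos hcol]
    rw [ih hpre']
    unfold buscarPosicionPalabra_alt
    rw [PySem.List.pyRange_one_cons hflt]
    simp only [pvScanRows, hrowD, reduceIte]
    rw [PySem.List.pyRange_one_eq_nil hcol]
    simp only [pvScanRow]
    apply congrArg (fun o => Option.getD o (-1, -1))
    apply pvScanRows_congr
    intro i hi
    rw [PySem.List.mem_pyRange_one] at hi
    have hne : i ≠ fila := by omega
    by_cases h2 : i = fila + 1 <;> simp [hne, h2]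
  | case4 fila columna hle row hrow hcol hnone =>
    exfalso
    have hrowD := pyGetD_of_some lista fila [] row hrow
    rcases hpre with h | ⟨hlo, hin⟩
    · omega
    · rw [hrowD] at hin
      rw [PySem.List.pyGet?_eq_none_iff] at hnone
      rcases hin with h | h
      · omega
      · exact hnone ⟨h, by omega⟩
  | case5 fila columna hle row hrow hcol hw =>
    have hrowD := pyGetD_of_some lista fila [] row hrow
    have hflt : fila < (lista.length : Int) := by omega
    have hclo : -(row.length : Int) ≤ columna := by
      by_contra hc
      have : PySem.List.pyGet? row columna = none := by
        rw [PySem.List.pyGet?_eq_none_iff]; intro ⟨h1, _⟩; omega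
      simp [this] at hw
    have hwD := pyGetD_of_some row columna "" palabra hw
    rw [buscarPosicionPalabra, if_neg hle, hrow]
    simp only [if_neg hcol, hw, reduceIte]
    unfold buscarPosicionPalabra_alt
    rw [PySem.List.pyRange_one_cons hflt]
    simp only [pvScanRows, hrowD, reduceIte]
    rw [PySem.List.pyRange_one_cons (by omega : columna < (row.length : Int))]
    simp only [pvScanRow, hwD, reduceIte]
    rfl
  | case6 fila columna hle row hrow hcol w hw hne ih =>
    have hrowD := pyGetD_of_some lista fila [] row hrow
    have hflt : fila < (lista.length : Int) := by omega
    have hlo : -(lista.length : Int) ≤ fila := by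
      by_contra hc
      have : PySem.List.pyGet? lista fila = none := by
        rw [PySem.List.pyGet?_eq_none_iff]; intro ⟨h1, _⟩; omega
      simp [this] at hrow
    have hclo : -(row.length : Int) ≤ columna := by
      by_contra hc
      have : PySem.List.pyGet? row columna = none := by
        rw [PySem.List.pyGet?_eq_none_iff]; intro ⟨h1, _⟩; omega
      simp [this] at hw
    have hwD := pyGetD_of_some row columna "" w hw
    have hpre' : Pre_buscarPosicionPalabra lista palabra fila (columna + 1) := by
      unfold Pre_buscarPosicionPalabra
      right
      rw [hrowD]
      exact ⟨hlo, Or.inr (by omega)⟩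
    rw [buscarPosicionPalabra, if_neg hle, hrow]
    simp only [if_neg hcol, hw, if_neg hne]
    rw [ih hpre']
    unfold buscarPosicionPalabra_alt
    rw [PySem.List.pyRange_one_cons hflt]
    simp only [pvScanRows, hrowD, reduceIte]
    rw [PySem.List.pyRange_one_cons (by omega : columna < (row.length : Int))]
    simp only [pvScanRow, hwD, if_neg hne]
    apply congrArg (fun o => Option.getD o (-1, -1))
    cases hsc : pvScanRow row palabra fila (PySem.List.pyRange (columna + 1) (row.length : Int) 1) with
    | some p => rfl
    | none =>
      apply pvScanRows_congr
      intro i hi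
      rw [PySem.List.mem_pyRange_one] at hi
      have hne2 : i ≠ fila := by omega
      simp [hne2]

-- ===== VERDICT (by name: the statement is the Claim_ definition above) =====
theorem buscarPosicionPalabra_spec : Claim_equal_buscarPosicionPalabra := by
  intro lista palabra fila columna _ hpre
  unfold Spec_buscarPosicionPalabra
  exact pvMain lista palabra fila columna hpre
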